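-- pv_equiv track=rewrite | github.com/antecedent/k-mtslia-n | main.py | valid_k_gram
-- ===== SOURCE A (Python) =====
-- import itertools
--
-- def valid_k_gram(k_gram, edges):
--     k = len(k_gram)
--     return any(True for L, R in itertools.product(range(k + 1), repeat=2) \
--                if  all(k_gram[i] == edges[0]  for i in range(L)) \
--                and all(k_gram[i] == edges[1]  for i in range(R, k)) \
--                and not any(k_gram[i] in edges for i in range(L, R)) \
--                and not any({*k_gram} == {e} for e in edges) \
--                if L <= R)
-- ===== SOURCE B (Python) =====
-- def valid_k_gram(k_gram, edges):
--     # Single pass: maximal edges[0]-prefix, maximal edges[1]-suffix, edge-free middle.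
--     if not k_gram:
--         return True
--     a, b = edges[0], edges[1]
--     p = 0
--     while p < len(k_gram) and k_gram[p] == a:
--         p += 1
--     t = 0
--     while t < len(k_gram) and k_gram[len(k_gram) - 1 - t] == b:
--         t += 1
--     s = len(k_gram) - t
--     if any(set(k_gram) == {e} for e in edges):
--         return False
--     return not any(x in edges for x in k_gram[p:s])
-- ===== Notes on version B (the rewrite author's own statement) =====
-- stated objective: faster
-- what changed: A tests every (L,R) split pair with fresh prefix/suffix/middle scans (O(k^3)); B makes one O(k) pass computing the maximal edges[0]-prefix and edges[1]-suffix and checking the middle is edge-free.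
import Mathlib
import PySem

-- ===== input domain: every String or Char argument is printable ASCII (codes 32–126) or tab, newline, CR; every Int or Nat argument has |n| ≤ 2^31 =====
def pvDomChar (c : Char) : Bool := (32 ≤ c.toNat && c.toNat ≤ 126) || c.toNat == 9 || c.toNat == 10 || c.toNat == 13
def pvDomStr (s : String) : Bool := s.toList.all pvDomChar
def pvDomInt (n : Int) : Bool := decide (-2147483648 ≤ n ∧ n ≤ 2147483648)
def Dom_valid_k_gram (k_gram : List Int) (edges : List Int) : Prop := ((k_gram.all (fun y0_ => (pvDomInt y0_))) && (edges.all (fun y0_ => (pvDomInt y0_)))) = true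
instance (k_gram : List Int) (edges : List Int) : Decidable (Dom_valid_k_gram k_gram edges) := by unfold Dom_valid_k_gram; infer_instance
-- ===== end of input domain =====

-- B replaces A's O(k^3) scan over all (L,R) split pairs by a single O(k) pass:
-- maximal edges[0]-prefix, maximal edges[1]-suffix, and an edge-free check of the middle.

-- ===== PORT A =====
def valid_k_gram (k_gram : List Int) (edges : List Int) : Bool :=
  let k : Int := (k_gram.length : Int)
  ((PySem.List.pyRange 0 (k+1) 1).flatMap (fun L =>
      (PySem.List.pyRange 0 (k+1) 1).map (fun R => (L, R)))).any (fun LR =>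
    ((PySem.List.pyRange 0 LR.1 1).all (fun i =>
        PySem.List.pyGetD k_gram i 0 == PySem.List.pyGetD edges 0 0))
    && ((PySem.List.pyRange LR.2 k 1).all (fun i =>
        PySem.List.pyGetD k_gram i 0 == PySem.List.pyGetD edges 1 0))
    && (!((PySem.List.pyRange LR.1 LR.2 1).any (fun i =>
        edges.contains (PySem.List.pyGetD k_gram i 0))))
    && (!(edges.any (fun e =>
        PySem.Set.equal (PySem.Set.ofList k_gram) (PySem.Set.ofList [e]))))
    && decide (LR.1 ≤ LR.2))

-- ===== PORT B =====
-- length of the maximal prefix of xs whose elements all equal a (B's first while loop)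
def pvRun (a : Int) : List Int → Nat
  | [] => 0
  | x :: tl => if x == a then pvRun a tl + 1 else 0

def valid_k_gram_alt (k_gram : List Int) (edges : List Int) : Bool :=
  if k_gram.isEmpty then true
  else
    let a := PySem.List.pyGetD edges 0 0
    let b := PySem.List.pyGetD edges 1 0
    let p := pvRun a k_gram
    let t := pvRun b k_gram.reverse
    let s := k_gram.length - t
    if edges.any (fun e =>
        PySem.Set.equal (PySem.Set.ofList k_gram) (PySem.Set.ofList [e])) then false
    else !(((k_gram.drop p).take (s - p)).any (fun x => edges.contains x))

-- ===== PRECONDITION & SPEC =====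
-- A raises IndexError (edges[0] / edges[1]) exactly when k_gram is nonempty and edges has
-- fewer than two elements; Pre_ excludes only those inputs.
def Pre_valid_k_gram (k_gram : List Int) (edges : List Int) : Prop :=
  k_gram = [] ∨ 2 ≤ edges.length
instance (k_gram : List Int) (edges : List Int) : Decidable (Pre_valid_k_gram k_gram edges) := by
  unfold Pre_valid_k_gram; infer_instance

def pvWitness_valid_k_gram : List Int × List Int := ([1, 5, 2], [1, 2])

def Spec_valid_k_gram (k_gram : List Int) (edges : List Int) (out : Bool) : Prop := out = valid_k_gram_alt k_gram edges
instance (k_gram : List Int) (edges : List Int) (out : Bool) : Decidable (Spec_valid_k_gram k_gram edges out) := by unfold Spec_valid_k_gram; infer_instance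

-- ===== CLAIM (what is proved, stated in full; the proofs are below) =====
def Claim_equal_valid_k_gram : Prop := ∀ (k_gram : List Int) (edges : List Int), Dom_valid_k_gram k_gram edges → Pre_valid_k_gram k_gram edges → Spec_valid_k_gram k_gram edges (valid_k_gram k_gram edges)

-- ===== LEMMAS AND PROOFS =====

theorem pvRun_le (a : Int) (xs : List Int) : pvRun a xs ≤ xs.length := by
  induction xs with
  | nil => simp [pvRun]
  | cons x tl ih => simp only [pvRun, List.length_cons]; split <;> omega

theorem pvRun_iff (a : Int) (xs : List Int) (m : Nat) (hm : m ≤ xs.length) :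
    (∀ i < m, xs.getD i 0 = a) ↔ m ≤ pvRun a xs := by
  induction xs generalizing m with
  | nil => simp at hm; simp [hm]
  | cons x tl ih =>
    cases m with
    | zero => simp
    | succ m' =>
      simp only [List.length_cons, Nat.succ_le_succ_iff] at hm
      constructor
      · intro h
        have hx : x = a := h 0 (Nat.succ_pos _)
        have : ∀ i < m', tl.getD i 0 = a := by
          intro i hi
          have := h (i + 1) (by omega)
          simpa [List.getD] using this
        simp [pvRun, hx]
        exact (ih m' hm).mp this
      · intro h i hi
        simp only [pvRun] at h
        by_cases hx : x = a
        · cases i with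
          | zero => simpa [List.getD] using hx
          | succ i' =>
            simp [hx] at h
            have := (ih m' hm).mpr (by omega)
            simpa [List.getD] using this i' (by omega)
        · simp [hx] at h

theorem pv_main (k_gram edges : List Int) :
    valid_k_gram k_gram edges = valid_k_gram_alt k_gram edges := by
  by_cases hk : k_gram = []
  · subst hk
    simp only [valid_k_gram, valid_k_gram_alt, List.length_nil, List.isEmpty_nil, if_true]
    norm_num [PySem.List.pyRange_one_singleton, PySem.List.pyRange_one_eq_nil]
    exact ⟨0, ⟨le_refl 0, by norm_num⟩, 0, ⟨le_refl 0, by norm_num⟩,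
      ⟨⟨⟨fun x h1 h2 => absurd (lt_of_le_of_lt h1 h2) (lt_irrefl 0),
         fun x h1 h2 => absurd (lt_of_le_of_lt (le_trans (le_refl 0) h1) h2) (by omega)⟩,
        fun x h1 h2 => absurd (lt_of_le_of_lt h1 h2) (lt_irrefl 0)⟩, le_refl 0⟩⟩
  · -- k_gram nonempty
    set n := k_gram.length with hn
    have hn1 : 1 ≤ n := by
      cases k_gram with
      | nil => exact absurd rfl hk
      | cons x tl => simp [hn]
    set a := PySem.List.pyGetD edges 0 0 with ha
    set b := PySem.List.pyGetD edges 1 0 with hb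
    set p := pvRun a k_gram with hpdef
    set t := pvRun b k_gram.reverse with htdef
    have hpn : p ≤ n := pvRun_le a k_gram
    have htn : t ≤ n := by
      have := pvRun_le b k_gram.reverse
      simpa [hn] using this
    have hpv : ∀ i < p, k_gram.getD i 0 = a :=
      (pvRun_iff a k_gram p hpn).mpr le_rfl
    have hpm : p < n → k_gram.getD p 0 ≠ a := by
      intro h hcontra
      have : p + 1 ≤ p := (pvRun_iff a k_gram (p + 1) (by omega)).mp (by
        intro i hi
        rcases Nat.lt_succ_iff_lt_or_eq.mp hi with h' | h'
        · exact hpv i h'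
        · rw [h']; exact hcontra)
      omega
    have hrev : ∀ j < n, k_gram.reverse.getD j 0 = k_gram.getD (n - 1 - j) 0 := by
      intro j hj
      rw [List.getD_eq_getElem _ _ (by simpa [hn] using hj),
          List.getD_eq_getElem _ _ (by omega), List.getElem_reverse]
    have htv : ∀ j < t, k_gram.reverse.getD j 0 = b :=
      (pvRun_iff b k_gram.reverse t (by simpa [hn] using htn)).mpr le_rfl
    have hsv : ∀ i, n - t ≤ i → i < n → k_gram.getD i 0 = b := by
      intro i h1 h2
      have hjn : n - 1 - i < n := by omega
      have hjt : n - 1 - i < t := by omega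
      have := htv (n - 1 - i) hjt
      rw [hrev (n - 1 - i) hjn] at this
      have : k_gram.getD (n - 1 - (n - 1 - i)) 0 = b := this
      rwa [show n - 1 - (n - 1 - i) = i by omega] at this
    have hsm : t < n → k_gram.getD (n - 1 - t) 0 ≠ b := by
      intro h hcontra
      have : t + 1 ≤ t := (pvRun_iff b k_gram.reverse (t + 1) (by simpa [hn] using h)).mp (by
        intro j hj
        rcases Nat.lt_succ_iff_lt_or_eq.mp hj with h' | h'
        · exact htv j h'
        · rw [h', hrev t (by omega)]; exact hcontra)
      omega
    -- B-side characterization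
    have hB : valid_k_gram_alt k_gram edges = true ↔
        (edges.any (fun e => PySem.Set.equal (PySem.Set.ofList k_gram) (PySem.Set.ofList [e])) = false ∧
         ∀ i : Nat, p ≤ i → i < n - t → edges.contains (k_gram.getD i 0) = false) := by
      rw [valid_k_gram_alt]
      have hke : k_gram.isEmpty = false := by simpa using hk
      simp only [hke, Bool.false_eq_true, if_false, ← ha, ← hb, ← hpdef, ← htdef, ← hn]
      by_cases hset : (edges.any fun e =>
          (PySem.Set.ofList k_gram).equal (PySem.Set.ofList [e])) = true
      · simp [hset]
      · rw [Bool.not_eq_true] at hset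
        simp only [hset, Bool.false_eq_true, if_false, Bool.not_eq_true', List.any_eq_false,
          true_and]
        constructor
        · intro h i hip hit
          have hslice : k_gram.getD i 0 ∈ List.take (n - t - p) (List.drop p k_gram) := by
            rw [List.mem_iff_getElem]
            refine ⟨i - p, ?_, ?_⟩
            · simp [List.length_take, List.length_drop, ← hn]
              omega
            · have hpi : p + (i - p) = i := by omega
              rw [List.getElem_take, List.getElem_drop,
                List.getD_eq_getElem _ 0 (show i < k_gram.length by omega)]
              simp [hpi]
          exact Bool.eq_false_iff.mpr (h _ hslice)
        · intro h x hx
          rw [List.mem_iff_getElem] at hx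
          obtain ⟨j, hj, hxj⟩ := hx
          have hjlen : j < n - t - p ∧ j < n - p := by
            simpa [List.length_take, List.length_drop, ← hn] using hj
          have : x = k_gram.getD (p + j) 0 := by
            rw [← hxj, List.getElem_take, List.getElem_drop,
              List.getD_eq_getElem _ 0 (by omega)]
          rw [this]
          exact Bool.eq_false_iff.mp (h (p + j) (by omega) (by omega))
    -- A-side characterization
    have hA : valid_k_gram k_gram edges = true ↔
        (edges.any (fun e => PySem.Set.equal (PySem.Set.ofList k_gram) (PySem.Set.ofList [e])) = false ∧
         ∃ L R : Nat, L ≤ R ∧ R ≤ n ∧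
           (∀ i < L, k_gram.getD i 0 = a) ∧
           (∀ i : Nat, R ≤ i → i < n → k_gram.getD i 0 = b) ∧
           (∀ i : Nat, L ≤ i → i < R → edges.contains (k_gram.getD i 0) = false)) := by
      rw [valid_k_gram]
      simp only [List.any_eq_true, List.mem_flatMap, List.mem_map,
        PySem.List.mem_pyRange_one, List.all_eq_true, Bool.and_eq_true, Bool.not_eq_true',
        beq_iff_eq, decide_eq_true_iff, List.any_eq_false, ← ha, ← hb, ← hn]
      constructor
      · rintro ⟨x, ⟨L, ⟨hL0, hL1⟩, R, ⟨hR0, hR1⟩, rfl⟩, ⟨⟨⟨hpre, hsuf⟩, hmid⟩, hset⟩, hLR⟩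
        simp only at hpre hsuf hmid hLR
        refine ⟨hset, L.toNat, R.toNat, by omega, by omega, ?_, ?_, ?_⟩
        · intro i hi
          have := hpre (i : Int) ⟨by positivity, by omega⟩
          rwa [PySem.List.pyGetD_of_nonneg _ _ (by positivity), Int.toNat_natCast] at this
        · intro i h1 h2
          have := hsuf (i : Int) ⟨by omega, by omega⟩
          rwa [PySem.List.pyGetD_of_nonneg _ _ (by positivity), Int.toNat_natCast] at this
        · intro i h1 h2
          have := hmid (i : Int) ⟨by omega, by omega⟩
          rw [PySem.List.pyGetD_of_nonneg _ _ (by positivity), Int.toNat_natCast] at this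
          exact Bool.eq_false_iff.mpr this
      · rintro ⟨hset, L, R, hLR, hRn, hpre, hsuf, hmid⟩
        refine ⟨((L : Int), (R : Int)),
          ⟨(L : Int), ⟨by positivity, by omega⟩, (R : Int), ⟨by positivity, by omega⟩, rfl⟩,
          ⟨⟨⟨?_, ?_⟩, ?_⟩, hset⟩, by simp; exact_mod_cast hLR⟩
        · intro x hx
          rw [PySem.List.pyGetD_of_nonneg _ _ hx.1]
          exact hpre x.toNat (by omega)
        · intro x hx
          rw [PySem.List.pyGetD_of_nonneg _ _ (by omega)]
          exact hsuf x.toNat (by omega) (by omega)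
        · intro x hx
          rw [PySem.List.pyGetD_of_nonneg _ _ (by omega)]
          exact Bool.eq_false_iff.mp (hmid x.toNat (by omega) (by omega))
    rw [Bool.eq_iff_iff, hA, hB]
    constructor
    · rintro ⟨hset, L, R, hLR, hRn, hpre, hsuf, hmid⟩
      refine ⟨hset, fun i hip his => ?_⟩
      have hLp : L ≤ p := by
        by_contra hLp
        push Not at hLp
        exact hpm (by omega) (hpre p hLp)
      have hsR : n - t ≤ R := by
        by_contra hsR
        push Not at hsR
        have htlt : t < n := by omega
        exact hsm htlt (hsuf (n - 1 - t) (by omega) (by omega))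
      exact hmid i (by omega) (by omega)
    · rintro ⟨hset, hmid⟩
      refine ⟨hset, min p (n - t), n - t, ?_, ?_, ?_, ?_, ?_⟩
      · omega
      · omega
      · intro i hi
        exact hpv i (by omega)
      · intro i h1 h2
        exact hsv i h1 h2
      · intro i h1 h2
        exact hmid i (by omega) h2

-- ===== VERDICT (by name: the statement is the Claim_ definition above) =====
theorem valid_k_gram_spec : Claim_equal_valid_k_gram := by
  intro k_gram edges _ _
  unfold Spec_valid_k_gram
  exact pv_main k_gram edges
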